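-- pv_equiv track=rewrite | github.com/leylabernie/luxemiashop | build_boutique_csv.py | fabric_description
-- ===== SOURCE A (Python) =====
-- def fabric_description(fabric):
--     descs = {
--         'Lycra': '<strong>Lycra.</strong> Fluid, figure-flattering, and effortlessly comfortable — lycra drapes like a dream and moves with you, making it the perfect canvas for sequin artistry.',
--         'Silk': '<strong>Silk.</strong> Luxurious, luminous, and steeped in tradition — silk catches the light with every fold, creating a regal presence that transforms any occasion into something extraordinary.',
--         'Pure Silk': '<strong>Pure Silk.</strong> The pinnacle of Indian textile luxury — pure silk offers unmatched lustre, a buttery-soft hand feel, and a weight that drapes with architectural precision. This is fabric that commands attention.',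
--         'Silk Blend': '<strong>Silk Blend.</strong> The best of both worlds — silk blend combines the natural sheen and elegance of silk with the practical durability of blended fibres, creating a fabric that looks luxurious and wears beautifully.',
--         'Crepe Silk': '<strong>Crepe Silk.</strong> Modern, textured, and incredibly chic — crepe silk offers a matte-sheen finish that photographs exquisitely, with a fluid drape that flatters every silhouette.',
--         'Chinon Silk': '<strong>Chinon Silk.</strong> Soft, flowy, and effortlessly elegant — chinon silk drapes beautifully against the body, catching light with a subtle sheen that makes every silhouette look intentional and refined.',
--         'Chinon': '<strong>Chinon.</strong> Lightweight and gracefully fluid — chinon fabric floats rather than falls, creating an ethereal silhouette that moves beautifully and feels weightless against the skin.',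
--         'Shimmer Silk': '<strong>Shimmer Silk.</strong> Catching light from every angle — shimmer silk brings a modern glamour to traditional embroidery, creating a fabric that sparkles with every step.',
--         'Fendy Silk': '<strong>Fendy Silk.</strong> Rich in texture and generous in drape — fendy silk offers a structured yet flowing silhouette that holds embroidery beautifully and creates a commanding presence.',
--         'Georgette': '<strong>Georgette.</strong> Light, airy, and effortlessly graceful — georgette is the fabric of choice for those who value movement and comfort without compromising on style.',
--         'Art Silk': '<strong>Art Silk.</strong> The intelligent alternative to pure silk — art silk delivers the same lustrous sheen and structured drape at a fraction of the weight, making it perfect for long celebrations.',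
--         'Banarasi Jacquard': '<strong>Banarasi Jacquard.</strong> Woven with centuries of Banarasi weaving heritage — the jacquard technique creates intricate patterns that are part of the fabric itself, not merely embroidered on top. This is textile artistry.',
--         'Embosed Velvet': '<strong>Embosed Velvet.</strong> Rich, textured, and unapologetically luxurious — embosed velvet creates a three-dimensional pattern that catches light differently from every angle. Made for the groom who commands the room.',
--     }
--     for k, v in sorted(descs.items(), key=lambda x: len(x[0]), reverse=True):
--         if k.lower() in fabric.lower() if fabric else '':
--             return v
--     return '<strong>Premium Fabric.</strong> Carefully selected for its drape, longevity, and the way it makes the wearer feel as good as she looks.'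
-- ===== SOURCE B (Python) =====
-- def fabric_description(fabric):
--     descs = {
--         'Lycra': '<strong>Lycra.</strong> Fluid, figure-flattering, and effortlessly comfortable — lycra drapes like a dream and moves with you, making it the perfect canvas for sequin artistry.',
--         'Silk': '<strong>Silk.</strong> Luxurious, luminous, and steeped in tradition — silk catches the light with every fold, creating a regal presence that transforms any occasion into something extraordinary.',
--         'Pure Silk': '<strong>Pure Silk.</strong> The pinnacle of Indian textile luxury — pure silk offers unmatched lustre, a buttery-soft hand feel, and a weight that drapes with architectural precision. This is fabric that commands attention.',
--         'Silk Blend': '<strong>Silk Blend.</strong> The best of both worlds — silk blend combines the natural sheen and elegance of silk with the practical durability of blended fibres, creating a fabric that looks luxurious and wears beautifully.',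
--         'Crepe Silk': '<strong>Crepe Silk.</strong> Modern, textured, and incredibly chic — crepe silk offers a matte-sheen finish that photographs exquisitely, with a fluid drape that flatters every silhouette.',
--         'Chinon Silk': '<strong>Chinon Silk.</strong> Soft, flowy, and effortlessly elegant — chinon silk drapes beautifully against the body, catching light with a subtle sheen that makes every silhouette look intentional and refined.',
--         'Chinon': '<strong>Chinon.</strong> Lightweight and gracefully fluid — chinon fabric floats rather than falls, creating an ethereal silhouette that moves beautifully and feels weightless against the skin.',
--         'Shimmer Silk': '<strong>Shimmer Silk.</strong> Catching light from every angle — shimmer silk brings a modern glamour to traditional embroidery, creating a fabric that sparkles with every step.',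
--         'Fendy Silk': '<strong>Fendy Silk.</strong> Rich in texture and generous in drape — fendy silk offers a structured yet flowing silhouette that holds embroidery beautifully and creates a commanding presence.',
--         'Georgette': '<strong>Georgette.</strong> Light, airy, and effortlessly graceful — georgette is the fabric of choice for those who value movement and comfort without compromising on style.',
--         'Art Silk': '<strong>Art Silk.</strong> The intelligent alternative to pure silk — art silk delivers the same lustrous sheen and structured drape at a fraction of the weight, making it perfect for long celebrations.',
--         'Banarasi Jacquard': '<strong>Banarasi Jacquard.</strong> Woven with centuries of Banarasi weaving heritage — the jacquard technique creates intricate patterns that are part of the fabric itself, not merely embroidered on top. This is textile artistry.',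
--         'Embosed Velvet': '<strong>Embosed Velvet.</strong> Rich, textured, and unapologetically luxurious — embosed velvet creates a three-dimensional pattern that catches light differently from every angle. Made for the groom who commands the room.',
--     }
--     default = '<strong>Premium Fabric.</strong> Carefully selected for its drape, longevity, and the way it makes the wearer feel as good as she looks.'
--     if not fabric:
--         return default
--     fl = fabric.lower()
--     matches = [(k, v) for k, v in descs.items() if k.lower() in fl]
--     if not matches:
--         return default
--     return max(matches, key=lambda kv: len(kv[0]))[1]
-- ===== Notes on version B (the rewrite author's own statement) =====
-- stated objective: simpler
-- what changed: Replaced A's stable reverse-sort of the whole table by key length followed by a first-match scan with a single filter of matching keys plus max(key=len), relying on max's first-maximal tie-break to reproduce A's choice.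
import Mathlib
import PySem

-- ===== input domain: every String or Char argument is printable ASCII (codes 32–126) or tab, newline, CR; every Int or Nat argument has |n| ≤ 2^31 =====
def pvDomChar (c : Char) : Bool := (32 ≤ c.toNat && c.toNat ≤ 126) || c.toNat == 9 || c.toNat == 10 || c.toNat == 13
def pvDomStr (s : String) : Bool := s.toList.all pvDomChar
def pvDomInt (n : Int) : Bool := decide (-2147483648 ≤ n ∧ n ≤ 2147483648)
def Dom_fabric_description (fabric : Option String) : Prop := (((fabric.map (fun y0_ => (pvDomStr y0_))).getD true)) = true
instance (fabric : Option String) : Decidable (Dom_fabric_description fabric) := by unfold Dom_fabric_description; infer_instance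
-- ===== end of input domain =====

-- B replaces A's sort-descending-then-scan with a filter + max(key=len); objective: simpler. A and B agree on the return value everywhere.

-- the constant fabric → description table, in Python dict insertion order (shared literal data of both ports)
def pvDescs : List (String × String) := [
  ("Lycra", "<strong>Lycra.</strong> Fluid, figure-flattering, and effortlessly comfortable — lycra drapes like a dream and moves with you, making it the perfect canvas for sequin artistry."),
  ("Silk", "<strong>Silk.</strong> Luxurious, luminous, and steeped in tradition — silk catches the light with every fold, creating a regal presence that transforms any occasion into something extraordinary."),
  ("Pure Silk", "<strong>Pure Silk.</strong> The pinnacle of Indian textile luxury — pure silk offers unmatched lustre, a buttery-soft hand feel, and a weight that drapes with architectural precision. This is fabric that commands attention."),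
  ("Silk Blend", "<strong>Silk Blend.</strong> The best of both worlds — silk blend combines the natural sheen and elegance of silk with the practical durability of blended fibres, creating a fabric that looks luxurious and wears beautifully."),
  ("Crepe Silk", "<strong>Crepe Silk.</strong> Modern, textured, and incredibly chic — crepe silk offers a matte-sheen finish that photographs exquisitely, with a fluid drape that flatters every silhouette."),
  ("Chinon Silk", "<strong>Chinon Silk.</strong> Soft, flowy, and effortlessly elegant — chinon silk drapes beautifully against the body, catching light with a subtle sheen that makes every silhouette look intentional and refined."),
  ("Chinon", "<strong>Chinon.</strong> Lightweight and gracefully fluid — chinon fabric floats rather than falls, creating an ethereal silhouette that moves beautifully and feels weightless against the skin."),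
  ("Shimmer Silk", "<strong>Shimmer Silk.</strong> Catching light from every angle — shimmer silk brings a modern glamour to traditional embroidery, creating a fabric that sparkles with every step."),
  ("Fendy Silk", "<strong>Fendy Silk.</strong> Rich in texture and generous in drape — fendy silk offers a structured yet flowing silhouette that holds embroidery beautifully and creates a commanding presence."),
  ("Georgette", "<strong>Georgette.</strong> Light, airy, and effortlessly graceful — georgette is the fabric of choice for those who value movement and comfort without compromising on style."),
  ("Art Silk", "<strong>Art Silk.</strong> The intelligent alternative to pure silk — art silk delivers the same lustrous sheen and structured drape at a fraction of the weight, making it perfect for long celebrations."),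
  ("Banarasi Jacquard", "<strong>Banarasi Jacquard.</strong> Woven with centuries of Banarasi weaving heritage — the jacquard technique creates intricate patterns that are part of the fabric itself, not merely embroidered on top. This is textile artistry."),
  ("Embosed Velvet", "<strong>Embosed Velvet.</strong> Rich, textured, and unapologetically luxurious — embosed velvet creates a three-dimensional pattern that catches light differently from every angle. Made for the groom who commands the room.")]

def pvDefault : String := "<strong>Premium Fabric.</strong> Carefully selected for its drape, longevity, and the way it makes the wearer feel as good as she looks."

-- ===== PORT A =====
-- the loop condition `(k.lower() in fabric.lower()) if fabric else ''` (truthiness of '' is False)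
def pvMatches (fabric : Option String) (k : String) : Bool :=
  match fabric with
  | none => false
  | some f => if f = "" then false else PySem.Str.isIn (PySem.Str.lower k) (PySem.Str.lower f)

-- `for k, v in sorted(...): if cond: return v` / fall through to the default
def pvLoopA (fabric : Option String) : List (String × String) → String
  | [] => pvDefault
  | (k, v) :: t => if pvMatches fabric k then v else pvLoopA fabric t

def fabric_description (fabric : Option String) : String :=
  pvLoopA fabric (PySem.List.sorted pvDescs (fun x => PySem.Str.len x.1) true)

-- ===== PORT B =====
def fabric_description_alt (fabric : Option String) : String :=
  match fabric with
  | none => pvDefault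
  | some f =>
    if f = "" then pvDefault
    else
      let fl := PySem.Str.lower f
      let cands := pvDescs.filter (fun kv => PySem.Str.isIn (PySem.Str.lower kv.1) fl)
      match PySem.List.max? cands (fun kv => PySem.Str.len kv.1) with
      | some kv => kv.2
      | none => pvDefault

-- ===== PRECONDITION & SPEC =====
def Spec_fabric_description (fabric : Option String) (out : String) : Prop := out = fabric_description_alt fabric
instance (fabric : Option String) (out : String) : Decidable (Spec_fabric_description fabric out) := by unfold Spec_fabric_description; infer_instance

-- ===== CLAIM (what is proved, stated in full; the proofs are below) =====
def Claim_equal_fabric_description : Prop := ∀ (fabric : Option String), Dom_fabric_description fabric → Spec_fabric_description fabric (fabric_description fabric)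

-- ===== LEMMAS AND PROOFS =====

-- the table sorted by descending key length (stable), fully evaluated
def pvSorted : List (String × String) := [
  ("Banarasi Jacquard", "<strong>Banarasi Jacquard.</strong> Woven with centuries of Banarasi weaving heritage — the jacquard technique creates intricate patterns that are part of the fabric itself, not merely embroidered on top. This is textile artistry."),
  ("Embosed Velvet", "<strong>Embosed Velvet.</strong> Rich, textured, and unapologetically luxurious — embosed velvet creates a three-dimensional pattern that catches light differently from every angle. Made for the groom who commands the room."),
  ("Shimmer Silk", "<strong>Shimmer Silk.</strong> Catching light from every angle — shimmer silk brings a modern glamour to traditional embroidery, creating a fabric that sparkles with every step."),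
  ("Chinon Silk", "<strong>Chinon Silk.</strong> Soft, flowy, and effortlessly elegant — chinon silk drapes beautifully against the body, catching light with a subtle sheen that makes every silhouette look intentional and refined."),
  ("Silk Blend", "<strong>Silk Blend.</strong> The best of both worlds — silk blend combines the natural sheen and elegance of silk with the practical durability of blended fibres, creating a fabric that looks luxurious and wears beautifully."),
  ("Crepe Silk", "<strong>Crepe Silk.</strong> Modern, textured, and incredibly chic — crepe silk offers a matte-sheen finish that photographs exquisitely, with a fluid drape that flatters every silhouette."),
  ("Fendy Silk", "<strong>Fendy Silk.</strong> Rich in texture and generous in drape — fendy silk offers a structured yet flowing silhouette that holds embroidery beautifully and creates a commanding presence."),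
  ("Pure Silk", "<strong>Pure Silk.</strong> The pinnacle of Indian textile luxury — pure silk offers unmatched lustre, a buttery-soft hand feel, and a weight that drapes with architectural precision. This is fabric that commands attention."),
  ("Georgette", "<strong>Georgette.</strong> Light, airy, and effortlessly graceful — georgette is the fabric of choice for those who value movement and comfort without compromising on style."),
  ("Art Silk", "<strong>Art Silk.</strong> The intelligent alternative to pure silk — art silk delivers the same lustrous sheen and structured drape at a fraction of the weight, making it perfect for long celebrations."),
  ("Chinon", "<strong>Chinon.</strong> Lightweight and gracefully fluid — chinon fabric floats rather than falls, creating an ethereal silhouette that moves beautifully and feels weightless against the skin."),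
  ("Lycra", "<strong>Lycra.</strong> Fluid, figure-flattering, and effortlessly comfortable — lycra drapes like a dream and moves with you, making it the perfect canvas for sequin artistry."),
  ("Silk", "<strong>Silk.</strong> Luxurious, luminous, and steeped in tradition — silk catches the light with every fold, creating a regal presence that transforms any occasion into something extraordinary.")]

set_option maxRecDepth 100000 in
theorem pvSorted_eq : PySem.List.sorted pvDescs (fun x => PySem.Str.len x.1) true = pvSorted := by
  decide

-- first element of ps whose parallel Bool is true (A's scan, with the tests abstracted out)
def pvSel : List Bool → List (String × String) → Option (String × String)
  | b :: bs, p :: ps => if b then some p else pvSel bs ps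
  | _, _ => none

-- the elements of ps whose parallel Bool is true (B's filter, with the tests abstracted out)
def pvFilt : List Bool → List (String × String) → List (String × String)
  | b :: bs, p :: ps => if b then p :: pvFilt bs ps else pvFilt bs ps
  | _, _ => []

theorem pvLoopA_eq_pvSel (fabric : Option String) (l : List (String × String)) :
    pvLoopA fabric l =
      match pvSel (l.map (fun kv => pvMatches fabric kv.1)) l with
      | some kv => kv.2
      | none => pvDefault := by
  induction l with
  | nil => rfl
  | cons p t ih =>
    obtain ⟨k, v⟩ := p
    by_cases h : pvMatches fabric k
    · simp [pvLoopA, pvSel, h]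
    · simp only [pvLoopA, pvSel, List.map_cons, h, if_neg, Bool.false_eq_true, not_false_iff]
      exact ih

theorem filter_eq_pvFilt (p : String × String → Bool) (l : List (String × String)) :
    l.filter p = pvFilt (l.map p) l := by
  induction l with
  | nil => rfl
  | cons x t ih =>
    by_cases h : p x
    · simp [pvFilt, h, ih]
    · simp [pvFilt, h, ih]

-- the crux, over the 13 abstract test results (insertion order b1..b13):
-- A's scan of the length-sorted table = B's max-by-key-length over the filtered table
set_option maxRecDepth 100000 in
set_option maxHeartbeats 2000000 in
theorem pvKey13 : ∀ (b1 : Bool) (b2 : Bool) (b3 : Bool) (b4 : Bool) (b5 : Bool) (b6 : Bool) (b7 : Bool) (b8 : Bool) (b9 : Bool) (b10 : Bool) (b11 : Bool) (b12 : Bool) (b13 : Bool),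
    (match pvSel [b12, b13, b8, b6, b4, b5, b9, b3, b10, b11, b7, b1, b2] pvSorted with
     | some kv => kv.2
     | none => pvDefault)
    = (match PySem.List.max? (pvFilt [b1, b2, b3, b4, b5, b6, b7, b8, b9, b10, b11, b12, b13] pvDescs) (fun kv => PySem.Str.len kv.1) with
       | some kv => kv.2
       | none => pvDefault) := by
  decide

-- ===== VERDICT (by name: the statement is the Claim_ definition above) =====
set_option maxRecDepth 100000 in
set_option maxHeartbeats 1000000 in
theorem fabric_description_spec : Claim_equal_fabric_description := by
  intro fabric _
  unfold Spec_fabric_description fabric_description fabric_description_alt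
  rw [pvSorted_eq, pvLoopA_eq_pvSel]
  match fabric with
  | none => decide
  | some f =>
    by_cases hf : f = ""
    · subst hf; decide
    · simp only [hf, if_false]
      rw [filter_eq_pvFilt]
      simp only [List.map_cons, List.map_nil, pvDescs, pvSorted, pvMatches, hf, if_false]
      exact pvKey13 ..
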